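-- pv_equiv track=rewrite | github.com/Ragin-Bull/advent-of-code | 2024/Day-1/part_2.py | get_final_ans
-- ===== SOURCE A (Python) =====
-- from collections import defaultdict
--
-- def get_final_ans(array_a, array_b):
--     similarity = 0
--     df = defaultdict(int)
--
--     for element in array_b:
--         df[element] += 1
--
--     for element in array_a:
--         similarity += element * df[element]
--
--     return similarity
-- ===== SOURCE B (Python) =====
-- def get_final_ans(array_a, array_b):
--     a = sorted(array_a)
--     b = sorted(array_b)
--     total = 0
--     i, j = 0, 0
--     n, m = len(a), len(b)
--     while i < n and j < m:
--         if a[i] < b[j]: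
--             i += 1
--         elif b[j] < a[i]:
--             j += 1
--         else:
--             v = a[i]
--             ca = 0
--             while i < n and a[i] == v:
--                 ca += 1
--                 i += 1
--             cb = 0
--             while j < m and b[j] == v:
--                 cb += 1
--                 j += 1
--             total += v * ca * cb
--     return total
-- ===== Notes on version B (the rewrite author's own statement) =====
-- stated objective: alternative
-- what changed: Replaces the frequency-dictionary pass with sorting both lists and a two-pointer merge over runs of equal values, adding v * (run length in a) * (run length in b) per common value.
import Mathlib
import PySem

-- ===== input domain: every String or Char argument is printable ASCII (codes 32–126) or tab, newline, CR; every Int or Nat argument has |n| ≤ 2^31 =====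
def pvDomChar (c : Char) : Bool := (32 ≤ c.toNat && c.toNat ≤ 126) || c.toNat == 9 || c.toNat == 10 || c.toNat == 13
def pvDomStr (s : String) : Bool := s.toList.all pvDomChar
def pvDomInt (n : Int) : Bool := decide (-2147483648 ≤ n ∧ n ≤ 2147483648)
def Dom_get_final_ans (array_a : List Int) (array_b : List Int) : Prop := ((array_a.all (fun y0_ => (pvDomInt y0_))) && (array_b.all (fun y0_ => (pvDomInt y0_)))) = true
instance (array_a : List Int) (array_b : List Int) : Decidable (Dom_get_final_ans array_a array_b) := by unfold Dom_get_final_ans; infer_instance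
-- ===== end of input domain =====

-- B replaces A's frequency-dictionary pass with sorting both lists and a two-pointer
-- merge over runs of equal values (v * runlen_a * runlen_b per common value); same results.

-- ===== PORT A =====
def get_final_ans (array_a : List Int) (array_b : List Int) : Int :=
  let df : PySem.Dict Int Int :=
    array_b.foldl (fun d element => d.modify element 0 (· + 1)) PySem.Dict.empty
  array_a.foldl (fun similarity element => similarity + element * df.getD element 0) 0

-- ===== PORT B =====
-- the two-pointer merge of Source B: the inner "advance while equal, counting" while-loops
-- become takeWhile-length / dropWhile on the suffixes the pointers would traverse
def pvMergeSim : List Int → List Int → Int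
  | [], _ => 0
  | _ :: _, [] => 0
  | x :: xs, y :: ys =>
    if x < y then pvMergeSim xs (y :: ys)
    else if y < x then pvMergeSim (x :: xs) ys
    else
      x * (1 + ((xs.takeWhile (· == x)).length : Int)) * (1 + ((ys.takeWhile (· == x)).length : Int))
        + pvMergeSim (xs.dropWhile (· == x)) (ys.dropWhile (· == x))
termination_by a b => a.length + b.length
decreasing_by
  all_goals
    have h1 := List.length_dropWhile_le (p := (· == x)) (l := xs)
    have h2 := List.length_dropWhile_le (p := (· == x)) (l := ys)
    simp; try omega

def get_final_ans_alt (array_a : List Int) (array_b : List Int) : Int :=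
  pvMergeSim (PySem.List.sorted array_a (fun z => z) false)
             (PySem.List.sorted array_b (fun z => z) false)

-- ===== PRECONDITION & SPEC =====
def Spec_get_final_ans (array_a : List Int) (array_b : List Int) (out : Int) : Prop := out = get_final_ans_alt array_a array_b
instance (array_a : List Int) (array_b : List Int) (out : Int) : Decidable (Spec_get_final_ans array_a array_b out) := by unfold Spec_get_final_ans; infer_instance

-- ===== CLAIM (what is proved, stated in full; the proofs are below) =====
def Claim_equal_get_final_ans : Prop := ∀ (array_a : List Int) (array_b : List Int), Dom_get_final_ans array_a array_b → Spec_get_final_ans array_a array_b (get_final_ans array_a array_b)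

-- ===== LEMMAS AND PROOFS =====

theorem pv_run_sum (x : Int) (t : List Int) (h : ∀ z ∈ t, z = x) (f : Int → Int) :
    (t.map f).sum = t.length * f x := by
  induction t with
  | nil => simp
  | cons a s ih =>
    have ha := h a (by simp)
    simp [ha, ih (fun z hz => h z (by simp [hz]))]
    ring

theorem pv_count_split (x : Int) (xs : List Int) :
    xs.count x = (xs.takeWhile (· == x)).length + (xs.dropWhile (· == x)).count x := by
  conv_lhs => rw [← List.takeWhile_append_dropWhile (p := (· == x)) (l := xs)]
  rw [List.count_append]
  congr 1
  rw [List.count_eq_length.mpr]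
  intro z hz
  have hz' : z = x := by simpa using List.mem_takeWhile_imp hz
  simp [hz']

theorem pv_drop_gt (x : Int) (l : List Int) (hs : l.Pairwise (· ≤ ·))
    (hge : ∀ z ∈ l, x ≤ z) : ∀ z ∈ l.dropWhile (· == x), x < z := by
  induction l with
  | nil => simp
  | cons h t ih =>
    by_cases hx : h = x
    · subst hx
      simp only [List.dropWhile_cons, BEq.rfl, if_pos]
      exact ih (List.Pairwise.sublist (List.sublist_cons_self h t) hs)
        (fun z hz => hge z (List.mem_cons_of_mem _ hz))
    · have hd : (h :: t).dropWhile (· == x) = h :: t := by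
        simp [hx]
      rw [hd]
      intro z hz
      have hxh : x < h := lt_of_le_of_ne (hge h (by simp)) (Ne.symm hx)
      rcases List.mem_cons.mp hz with rfl | hz
      · exact hxh
      · exact lt_of_lt_of_le hxh ((List.pairwise_cons.mp hs).1 z hz)

theorem pv_merge_eq (a b : List Int) (ha : a.Pairwise (· ≤ ·)) (hb : b.Pairwise (· ≤ ·)) :
    pvMergeSim a b = (a.map (fun z => z * (b.count z : Int))).sum := by
  induction a, b using pvMergeSim.induct with
  | case1 b => simp [pvMergeSim]
  | case2 x xs => simp [pvMergeSim]
  | case3 x xs y ys hxy ih =>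
    -- x < y : x not in b, head term vanishes
    have hnotin : x ∉ y :: ys := by
      intro hmem
      rcases List.mem_cons.mp hmem with rfl | hm
      · exact absurd hxy (lt_irrefl x)
      · exact absurd (lt_of_lt_of_le hxy ((List.pairwise_cons.mp hb).1 x hm)) (lt_irrefl x)
    rw [pvMergeSim, if_pos hxy]
    rw [ih (List.Pairwise.sublist (List.sublist_cons_self x xs) ha) hb]
    simp [List.count_eq_zero.mpr hnotin]
  | case4 x xs y ys hxy hyx ih =>
    -- y < x : y matches nothing in a
    rw [pvMergeSim, if_neg hxy, if_pos hyx]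
    rw [ih ha (List.Pairwise.sublist (List.sublist_cons_self y ys) hb)]
    apply congrArg List.sum
    apply List.map_congr_left
    intro z hz
    have hyz : y < z := by
      rcases List.mem_cons.mp hz with rfl | hm
      · exact hyx
      · exact lt_of_lt_of_le hyx ((List.pairwise_cons.mp ha).1 z hm)
    rw [List.count_cons]
    simp [Ne.symm (ne_of_gt hyz)]
  | case5 x xs y ys hxy hyx ih =>
    have hxey : x = y := le_antisymm (not_lt.mp hyx) (not_lt.mp hxy)
    subst hxey
    rw [pvMergeSim, if_neg hxy, if_neg hyx]
    set t := xs.takeWhile (· == x) with ht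
    set d := xs.dropWhile (· == x) with hd
    set tb := ys.takeWhile (· == x) with htb
    set db := ys.dropWhile (· == x) with hdb
    have haxs : xs.Pairwise (· ≤ ·) := List.Pairwise.sublist (List.sublist_cons_self x xs) ha
    have hbys : ys.Pairwise (· ≤ ·) := List.Pairwise.sublist (List.sublist_cons_self x ys) hb
    have hgea : ∀ z ∈ xs, x ≤ z := (List.pairwise_cons.mp ha).1
    have hgeb : ∀ z ∈ ys, x ≤ z := (List.pairwise_cons.mp hb).1
    have hdgt : ∀ z ∈ d, x < z := pv_drop_gt x xs haxs hgea
    have hdbgt : ∀ z ∈ db, x < z := pv_drop_gt x ys hbys hgeb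
    have hds : d.Pairwise (· ≤ ·) := List.Pairwise.sublist (List.dropWhile_sublist _) haxs
    have hdbs : db.Pairwise (· ≤ ·) := List.Pairwise.sublist (List.dropWhile_sublist _) hbys
    rw [ih hds hdbs]
    -- count of x in b
    have hcx : ((x :: ys).count x : Int) = 1 + tb.length := by
      rw [List.count_cons_self, pv_count_split x ys, List.count_eq_zero.mpr
        (fun hm => absurd (hdbgt x hm) (lt_irrefl x))]
      push_cast; ring
    -- decompose the sum over a = x :: (t ++ d)
    have hxs : xs = t ++ d := (List.takeWhile_append_dropWhile).symm
    have htx : ∀ z ∈ t, z = x := fun z hz => by simpa using List.mem_takeWhile_imp hz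
    rw [List.map_cons, List.sum_cons, hxs, List.map_append, List.sum_append]
    rw [pv_run_sum x t htx (fun z => z * ((x :: ys).count z : Int))]
    -- the d-part: counts in b restrict to counts in db
    have hdpart : (d.map (fun z => z * ((x :: ys).count z : Int))).sum
        = (d.map (fun z => z * (db.count z : Int))).sum := by
      apply congrArg List.sum
      apply List.map_congr_left
      intro z hz
      have hzx : x < z := hdgt z hz
      have hzcons : (x :: ys).count z = db.count z := by
        have hne : ¬ ((x == z) = true) := by simpa using ne_of_lt hzx
        rw [List.count_cons, if_neg hne]
        have h0 : tb.count z = 0 := by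
          rw [List.count_eq_zero]
          intro hm
          have : z = x := by simpa using List.mem_takeWhile_imp hm
          exact absurd this (ne_of_gt hzx)
        conv_lhs => rw [show ys = tb ++ db from (List.takeWhile_append_dropWhile).symm]
        rw [List.count_append, h0]
        omega
      rw [hzcons]
    rw [hdpart, hcx]
    ring

theorem get_final_ans_eq_alt (array_a array_b : List Int) :
    get_final_ans array_a array_b = get_final_ans_alt array_a array_b := by
  have hA : get_final_ans array_a array_b
      = (array_a.map (fun z => z * ((array_b.count z : Nat) : Int))).sum := by
    unfold get_final_ans
    have hdf : ∀ v : Int,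
        (array_b.foldl (fun d element => d.modify element 0 (· + 1)) PySem.Dict.empty).getD v 0
          = (array_b.count v : Int) := by
      intro v
      rw [PySem.Dict.getD_foldl_modify_add_one]
      simp
    simp only [hdf]
    rw [List.sum_eq_foldl, List.foldl_map]
  rw [hA]
  unfold get_final_ans_alt
  have hpa := PySem.List.sorted_perm (xs := array_a) (key := fun z => z) (rev := false)
  have hpb := PySem.List.sorted_perm (xs := array_b) (key := fun z => z) (rev := false)
  rw [pv_merge_eq _ _
    (by simpa using PySem.List.sorted_pairwise (xs := array_a) (key := fun z => z))
    (by simpa using PySem.List.sorted_pairwise (xs := array_b) (key := fun z => z))]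
  have hcnt : ∀ z : Int,
      (PySem.List.sorted array_b (fun z => z) false).count z = array_b.count z :=
    fun z => hpb.count_eq z
  simp only [hcnt]
  exact (hpa.map (fun z => z * (array_b.count z : Int))).sum_eq.symm

-- ===== VERDICT (by name: the statement is the Claim_ definition above) =====
theorem get_final_ans_spec : Claim_equal_get_final_ans := by
  intro a b _
  exact get_final_ans_eq_alt a b
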